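-- pv_equiv track=rewrite | github.com/Yushi219/PDF-Word-Hunter | app.py | remove_symbols_with_indices
-- ===== SOURCE A (Python) =====
-- def remove_symbols_with_indices(text):
--     search_text = []
--     indices = []
--     for i, c in enumerate(text):
--         if c.isalnum() or c.isspace():
--             search_text.append(c)
--             indices.append(i)
--     return ''.join(search_text), indices
-- ===== SOURCE B (Python) =====
-- def remove_symbols_with_indices(text):
--     # Run-segmentation: advance a cursor over maximal runs of kept characters,
--     # appending each run as one slice and its index range in one step.
--     pieces = []
--     indices = []
--     n = len(text)
--     i = 0
--     while i < n:
--         c = text[i]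
--         if c.isalnum() or c.isspace():
--             j = i + 1
--             while j < n and (text[j].isalnum() or text[j].isspace()):
--                 j += 1
--             pieces.append(text[i:j])
--             indices.extend(range(i, j))
--             i = j
--         else:
--             i += 1
--     return ''.join(pieces), indices
-- ===== Notes on version B (the rewrite author's own statement) =====
-- stated objective: alternative
-- what changed: Replaces A's per-character scan appending one char and one index at a time with a cursor-based run segmentation: an outer while finds each maximal run of kept characters, appends the whole run as one slice text[i:j] and its positions as range(i, j), and jumps the cursor to the run's end.
import Mathlib
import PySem

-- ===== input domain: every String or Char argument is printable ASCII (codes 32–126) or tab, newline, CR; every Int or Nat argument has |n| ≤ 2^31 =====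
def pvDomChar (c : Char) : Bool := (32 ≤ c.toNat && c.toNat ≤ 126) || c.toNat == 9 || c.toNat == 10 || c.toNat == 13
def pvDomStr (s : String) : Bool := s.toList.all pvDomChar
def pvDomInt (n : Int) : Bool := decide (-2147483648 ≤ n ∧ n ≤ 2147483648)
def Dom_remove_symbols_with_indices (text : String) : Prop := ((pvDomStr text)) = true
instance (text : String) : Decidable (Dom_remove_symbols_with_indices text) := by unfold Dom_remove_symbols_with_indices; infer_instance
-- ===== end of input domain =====

-- B replaces A's per-character scan with cursor-based run segmentation (maximal runs of
-- kept characters appended as whole slices and index ranges); alternative decomposition, same cost.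


-- ===== PORT A =====
-- single scan over enumerate(text), appending kept char and index to two accumulators
def remove_symbols_with_indices (text : String) : String × List Int :=
  let r := (PySem.List.enumerate text.toList 0).foldl
    (fun (acc : List Char × List Int) (p : Int × Char) =>
      if PySem.Chars.isalnum p.2 || PySem.Chars.isspace p.2 then
        (acc.1 ++ [p.2], acc.2 ++ [p.1])
      else acc)
    ([], [])
  (String.ofList r.1, r.2)

-- ===== PORT B =====
def pvKeep (c : Char) : Bool := PySem.Chars.isalnum c || PySem.Chars.isspace c

-- inner while loop: how many consecutive kept characters lie ahead of the cursor
def pvRunLen : List Char → Nat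
  | [] => 0
  | c :: cs => if pvKeep c then 1 + pvRunLen cs else 0

-- outer while loop over the cursor: on a kept char take the whole run as one slice
-- and one index range, then jump the cursor past the run; otherwise advance by one
def pvGoB : List Char → Int → List String × List Int
  | [], _ => ([], [])
  | c :: cs, i =>
    if pvKeep c then
      let k := pvRunLen cs
      let rest := pvGoB (cs.drop k) (i + (1 + k))
      (String.ofList (c :: cs.take k) :: rest.1, PySem.List.pyRange i (i + (1 + k)) 1 ++ rest.2)
    else
      pvGoB cs (i + 1)
  termination_by cs _ => cs.length
  decreasing_by
  · simp only [List.length_drop, List.length_cons]; omega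
  · simp only [List.length_cons]; omega

-- cursor-based run segmentation; ''.join(pieces) = foldl append over the pieces
def remove_symbols_with_indices_alt (text : String) : String × List Int :=
  let r := pvGoB text.toList 0
  (r.1.foldl (· ++ ·) "", r.2)

-- ===== PRECONDITION & SPEC =====
def Spec_remove_symbols_with_indices (text : String) (out : String × List Int) : Prop := out = remove_symbols_with_indices_alt text
instance (text : String) (out : String × List Int) : Decidable (Spec_remove_symbols_with_indices text out) := by unfold Spec_remove_symbols_with_indices; infer_instance

-- ===== CLAIM (what is proved, stated in full; the proofs are below) =====
def Claim_equal_remove_symbols_with_indices : Prop := ∀ (text : String), Dom_remove_symbols_with_indices text → Spec_remove_symbols_with_indices text (remove_symbols_with_indices text)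

-- ===== LEMMAS AND PROOFS =====

-- A's fold with two append-accumulators is the filtered list, split into its two projections.
theorem pv_foldA (P : Int × Char → Bool) (l : List (Int × Char)) (a : List Char) (b : List Int) :
    l.foldl
      (fun (acc : List Char × List Int) (p : Int × Char) =>
        if P p then (acc.1 ++ [p.2], acc.2 ++ [p.1]) else acc)
      (a, b)
    = (a ++ (l.filter P).map (·.2), b ++ (l.filter P).map (·.1)) := by
  induction l generalizing a b with
  | nil => simp
  | cons x xs ih =>
    by_cases h : P x = true <;> simp [h, ih]

-- the run taken/skipped by the cursor is takeWhile/dropWhile of pvKeep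
theorem pv_run_take : ∀ cs : List Char, cs.take (pvRunLen cs) = cs.takeWhile pvKeep := by
  intro cs
  induction cs with
  | nil => simp [pvRunLen]
  | cons c cs ih =>
    by_cases h : pvKeep c = true
    · simp [pvRunLen, h, Nat.add_comm 1 (pvRunLen cs), List.takeWhile_cons, ih]
    · simp [pvRunLen, h, List.takeWhile_cons]

theorem pv_run_drop : ∀ cs : List Char, cs.drop (pvRunLen cs) = cs.dropWhile pvKeep := by
  intro cs
  induction cs with
  | nil => simp [pvRunLen]
  | cons c cs ih =>
    by_cases h : pvKeep c = true
    · simp [pvRunLen, h, Nat.add_comm 1 (pvRunLen cs), List.dropWhile_cons, ih]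
    · simp [pvRunLen, h, List.dropWhile_cons]

theorem pv_run_len : ∀ cs : List Char, (pvRunLen cs : Int) = ((cs.takeWhile pvKeep).length : Int) := by
  intro cs
  induction cs with
  | nil => simp [pvRunLen]
  | cons c cs ih =>
    by_cases h : pvKeep c = true
    · simp only [pvRunLen, h, if_pos, List.takeWhile_cons, List.length_cons]
      push_cast
      omega
    · simp [pvRunLen, h, List.takeWhile_cons]

-- filtering an enumeration of an all-kept list keeps everything
theorem pv_filter_enum_all (t : List Char) (s : Int) (h : ∀ x ∈ t, pvKeep x = true) :
    (PySem.List.enumerate t s).filter (fun p => pvKeep p.2) = PySem.List.enumerate t s := by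
  refine List.filter_eq_self.2 ?_
  intro p hp
  rcases (PySem.List.mem_enumerate_iff t s p).1 hp with ⟨k, hk, rfl⟩
  exact h _ (List.getElem_mem hk)

-- main invariant: the cursor loop computes the filtered characters and indices
theorem pv_goB_spec : ∀ (n : Nat) (cs : List Char) (i : Int), cs.length ≤ n →
    ((pvGoB cs i).1.map String.toList).flatten = cs.filter pvKeep ∧
    (pvGoB cs i).2 = ((PySem.List.enumerate cs i).filter (fun p => pvKeep p.2)).map (·.1) := by
  intro n
  induction n with
  | zero =>
    intro cs i h
    have : cs = [] := List.eq_nil_of_length_eq_zero (Nat.le_zero.1 h)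
    subst this
    simp [pvGoB, PySem.List.enumerate]
  | succ n ih =>
    intro cs i h
    match cs with
    | [] => simp [pvGoB, PySem.List.enumerate]
    | c :: cs =>
      by_cases hc : pvKeep c = true
      · have hL0 : (0 : Int) ≤ ((cs.takeWhile pvKeep).length : Int) := Int.natCast_nonneg _
        have hlen : (cs.dropWhile pvKeep).length ≤ n := by
          have hd := List.length_dropWhile_le pvKeep cs
          simp only [List.length_cons] at h
          omega
        obtain ⟨ih1, ih2⟩ := ih (cs.dropWhile pvKeep) (i + 1 + ((cs.takeWhile pvKeep).length : Int)) hlen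
        have htw : ∀ x ∈ cs.takeWhile pvKeep, pvKeep x = true := fun x hx => List.mem_takeWhile_imp hx
        have hsplit : cs.takeWhile pvKeep ++ cs.dropWhile pvKeep = cs := List.takeWhile_append_dropWhile
        have harith : i + (1 + ((cs.takeWhile pvKeep).length : Int)) = i + 1 + ((cs.takeWhile pvKeep).length : Int) := by ring
        have hGo : pvGoB (c :: cs) i =
            (String.ofList (c :: cs.takeWhile pvKeep) ::
                (pvGoB (cs.dropWhile pvKeep) (i + 1 + ((cs.takeWhile pvKeep).length : Int))).1,
              PySem.List.pyRange i (i + 1 + ((cs.takeWhile pvKeep).length : Int)) 1 ++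
                (pvGoB (cs.dropWhile pvKeep) (i + 1 + ((cs.takeWhile pvKeep).length : Int))).2) := by
          rw [pvGoB]
          simp only [hc, if_pos]
          rw [pv_run_take, pv_run_drop, pv_run_len, harith]
        constructor
        · rw [hGo]
          simp only [List.map_cons, List.flatten_cons, String.toList_ofList, ih1,
            List.filter_cons, hc, if_pos, List.cons_append]
          conv_rhs => rw [← hsplit]
          rw [List.filter_append, List.filter_eq_self.2 htw]
        · rw [hGo, ih2]
          conv_rhs => rw [← hsplit]
          rw [PySem.List.enumerate_cons, PySem.List.enumerate_append]
          simp only [List.filter_cons, hc, if_pos, List.filter_append, List.map_cons,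
            List.map_append]
          rw [pv_filter_enum_all _ _ htw, PySem.List.map_fst_enumerate]
          rw [PySem.List.pyRange_one_cons (by omega)]
          simp only [List.cons_append]
      · have hlen : cs.length ≤ n := by simp only [List.length_cons] at h; omega
        obtain ⟨ih1, ih2⟩ := ih cs (i + 1) hlen
        rw [pvGoB]
        simp only [hc, if_neg, Bool.not_eq_true]
        refine ⟨?_, ?_⟩
        · rw [ih1]; simp [List.filter_cons, hc]
        · rw [ih2, PySem.List.enumerate_cons]
          simp [List.filter_cons, hc]

-- map (·.2) of the filtered enumeration is the filtered character list
theorem pv_filter_enum_snd : ∀ (cs : List Char) (s : Int),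
    ((PySem.List.enumerate cs s).filter (fun p => pvKeep p.2)).map (·.2) = cs.filter pvKeep := by
  intro cs
  induction cs with
  | nil => intro s; simp [PySem.List.enumerate]
  | cons c cs ih =>
    intro s
    rw [PySem.List.enumerate_cons]
    by_cases hc : pvKeep c = true <;> simp [List.filter_cons, hc, ih]

-- ''.join via foldl append, on character lists
theorem pv_join_foldl : ∀ (l : List String) (a : String),
    (l.foldl (· ++ ·) a).toList = a.toList ++ (l.map String.toList).flatten := by
  intro l
  induction l with
  | nil => intro a; simp
  | cons s l ih =>
    intro a
    simp [List.foldl_cons, ih, String.toList_append]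

-- ===== VERDICT (by name: the statement is the Claim_ definition above) =====
theorem remove_symbols_with_indices_spec : Claim_equal_remove_symbols_with_indices := by
  intro text _
  unfold Spec_remove_symbols_with_indices
  simp only [remove_symbols_with_indices, remove_symbols_with_indices_alt]
  rw [pv_foldA]
  obtain ⟨h1, h2⟩ := pv_goB_spec text.toList.length text.toList 0 le_rfl
  have hsnd := pv_filter_enum_snd text.toList 0
  simp only [pvKeep] at h1 h2 hsnd
  refine Prod.ext ?_ ?_
  · rw [← String.toList_inj]
    rw [pv_join_foldl]
    simp only [String.toList_ofList, List.nil_append, h1]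
    rw [← hsnd]
    simp
  · simp only [List.nil_append]
    exact h2.symm
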